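-- pv_equiv track=rewrite | github.com/lilintech/graph-analysis | server.py | build_interval_graph_efficient
-- ===== SOURCE A (Python) =====
-- from collections import defaultdict
--
-- def build_interval_graph_efficient(tasks):
--     """Build interval graph more efficiently using interval tree concept"""
--     G = defaultdict(list)
--     intervals = {task: (start, end) for task, start, end in tasks}
--
--     # Sort by start time for efficient overlap checking
--     sorted_tasks = sorted(tasks, key=lambda x: x[1])
--
--     for i, (t1, s1, e1) in enumerate(sorted_tasks):
--         for j in range(i + 1, len(sorted_tasks)):
--             t2, s2, e2 = sorted_tasks[j]
--             if s2 >= e1:  # No overlap and all subsequent tasks won't overlap either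
--                 break
--             if not (e1 <= s2 or e2 <= s1):  # Overlap condition
--                 G[t1].append(t2)
--                 G[t2].append(t1)
--
--     return dict(G), intervals
-- ===== SOURCE B (Python) =====
-- def _first_nonoverlap_pos(rest, e1):
--     """Binary search over rest (start times nondecreasing): first index whose
--     start time is >= e1; every earlier element starts before e1."""
--     lo, hi = 0, len(rest)
--     while lo < hi:
--         mid = (lo + hi) // 2
--         if rest[mid][1] < e1:
--             lo = mid + 1
--         else:
--             hi = mid
--     return lo
--
--
-- def build_interval_graph_efficient(tasks):
--     """Two-phase rebuild: enumerate overlap edges first (binary search for the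
--     overlap horizon on the start-sorted list), then assemble adjacency lists."""
--     intervals = {task: (start, end) for task, start, end in tasks}
--     st = sorted(tasks, key=lambda x: x[1])
--     edges = []
--     for i, (t1, s1, e1) in enumerate(st):
--         rest = st[i + 1:]
--         for t2, s2, e2 in rest[:_first_nonoverlap_pos(rest, e1)]:
--             if s1 < e2:
--                 edges.append((t1, t2))
--     G = {}
--     for a, b in edges:
--         G.setdefault(a, []).append(b)
--         G.setdefault(b, []).append(a)
--     return G, intervals
-- ===== Notes on version B (the rewrite author's own statement) =====
-- stated objective: alternative
-- what changed: A builds the graph by mutating a defaultdict inside nested index loops with a break; B first enumerates the overlap edges (using a hand-written binary search on the start-sorted list to find each interval's overlap horizon instead of a linear scan-with-break), then assembles the adjacency dict in a single fold over that edge list.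
import Mathlib
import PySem

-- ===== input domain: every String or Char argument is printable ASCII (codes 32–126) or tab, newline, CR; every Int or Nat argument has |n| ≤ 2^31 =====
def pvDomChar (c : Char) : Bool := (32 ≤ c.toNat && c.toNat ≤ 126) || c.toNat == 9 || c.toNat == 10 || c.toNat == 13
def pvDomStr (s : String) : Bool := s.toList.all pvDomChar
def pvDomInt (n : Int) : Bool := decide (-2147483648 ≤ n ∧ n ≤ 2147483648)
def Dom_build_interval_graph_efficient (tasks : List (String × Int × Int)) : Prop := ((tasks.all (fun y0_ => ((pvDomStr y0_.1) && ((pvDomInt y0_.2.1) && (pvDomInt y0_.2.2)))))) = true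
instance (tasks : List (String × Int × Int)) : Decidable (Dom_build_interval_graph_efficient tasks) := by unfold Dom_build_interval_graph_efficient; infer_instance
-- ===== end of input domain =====

-- B separates edge enumeration (a binary search finds the overlap horizon on the start-sorted
-- list) from graph assembly (one fold over the edge list); same cost, alternative structure.

-- ===== PORT A =====
-- G[k].append(v) on the defaultdict(list) G
def pvDappend (G : PySem.Dict String (List String)) (k v : String) : PySem.Dict String (List String) :=
  G.insert k (G.getD k [] ++ [v])

-- inner loop 'for j in range(i + 1, len(sorted_tasks)): … break …', run on the suffix after index i
def pvInnerA (t1 : String) (s1 e1 : Int) : List (String × Int × Int) → PySem.Dict String (List String) → PySem.Dict String (List String)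
  | [], G => G
  | (t2, s2, e2) :: rest, G =>
    if e1 ≤ s2 then G   -- 'if s2 >= e1: break'
    else pvInnerA t1 s1 e1 rest
      (if ¬ (e1 ≤ s2 ∨ e2 ≤ s1) then pvDappend (pvDappend G t1 t2) t2 t1 else G)

-- outer loop 'for i, (t1, s1, e1) in enumerate(sorted_tasks)'
def pvOuterA : List (String × Int × Int) → PySem.Dict String (List String) → PySem.Dict String (List String)
  | [], G => G
  | (t1, s1, e1) :: rest, G => pvOuterA rest (pvInnerA t1 s1 e1 rest G)

def build_interval_graph_efficient (tasks : List (String × Int × Int)) : (List (String × List String)) × (List (String × Int × Int)) :=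
  let intervals := tasks.foldl (fun d x => d.insert x.1 x.2) PySem.Dict.empty
  let sorted_tasks := PySem.List.sorted tasks (fun x => x.2.1)
  ((pvOuterA sorted_tasks PySem.Dict.empty).items, intervals.items)

-- ===== PORT B =====
-- hand-written binary search of Source B (_first_nonoverlap_pos); 'rest[mid]' is always in range in
-- the Python (0 ≤ lo ≤ mid < hi ≤ len(rest)), so the getD default is never read: exact there
def pvBisect (rest : List (String × Int × Int)) (e1 : Int) (lo hi : Nat) : Nat :=
  if lo < hi then
    let mid := (lo + hi) / 2
    if (rest.getD mid ("", 0, 0)).2.1 < e1 then pvBisect rest e1 (mid + 1) hi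
    else pvBisect rest e1 lo mid
  else lo
termination_by hi - lo
decreasing_by all_goals omega

-- edge enumeration: 'for i, (t1, s1, e1) in enumerate(st): rest = st[i+1:]; …'
def pvEdgesB : List (String × Int × Int) → List (String × String)
  | [] => []
  | (t1, s1, e1) :: rest =>
    ((rest.take (pvBisect rest e1 0 rest.length)).filter (fun x => s1 < x.2.2)).map (fun x => (t1, x.1))
      ++ pvEdgesB rest

-- graph assembly: 'for a, b in edges: G.setdefault(a, []).append(b); G.setdefault(b, []).append(a)'
def pvAddEdge (G : PySem.Dict String (List String)) (p : String × String) : PySem.Dict String (List String) :=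
  (G.modify p.1 [] (· ++ [p.2])).modify p.2 [] (· ++ [p.1])

def build_interval_graph_efficient_alt (tasks : List (String × Int × Int)) : (List (String × List String)) × (List (String × Int × Int)) :=
  let intervals := tasks.foldl (fun d x => d.insert x.1 x.2) PySem.Dict.empty
  let st := PySem.List.sorted tasks (fun x => x.2.1)
  (((pvEdgesB st).foldl pvAddEdge PySem.Dict.empty).items, intervals.items)

-- ===== PRECONDITION & SPEC =====
def Spec_build_interval_graph_efficient (tasks : List (String × Int × Int)) (out : (List (String × List String)) × (List (String × Int × Int))) : Prop := out = build_interval_graph_efficient_alt tasks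
instance (tasks : List (String × Int × Int)) (out : (List (String × List String)) × (List (String × Int × Int))) : Decidable (Spec_build_interval_graph_efficient tasks out) := by unfold Spec_build_interval_graph_efficient; infer_instance

-- ===== CLAIM (what is proved, stated in full; the proofs are below) =====
def Claim_equal_build_interval_graph_efficient : Prop := ∀ (tasks : List (String × Int × Int)), Dom_build_interval_graph_efficient tasks → Spec_build_interval_graph_efficient tasks (build_interval_graph_efficient tasks)

-- ===== LEMMAS AND PROOFS =====

-- the binary search brackets the first start time ≥ e1 (needs nondecreasing start times)
theorem pvBisect_char (rest : List (String × Int × Int)) (e1 : Int)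
    (hmono : rest.Pairwise (fun a b => a.2.1 ≤ b.2.1)) :
    ∀ lo hi, lo ≤ hi → hi ≤ rest.length →
    (∀ k, k < lo → (rest.getD k ("", 0, 0)).2.1 < e1) →
    (∀ k, hi ≤ k → k < rest.length → e1 ≤ (rest.getD k ("", 0, 0)).2.1) →
    pvBisect rest e1 lo hi ≤ hi ∧
    (∀ k, k < pvBisect rest e1 lo hi → (rest.getD k ("", 0, 0)).2.1 < e1) ∧
    (∀ k, pvBisect rest e1 lo hi ≤ k → k < rest.length → e1 ≤ (rest.getD k ("", 0, 0)).2.1) := by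
  have hm : ∀ i j, i ≤ j → j < rest.length →
      (rest.getD i ("", 0, 0)).2.1 ≤ (rest.getD j ("", 0, 0)).2.1 := by
    intro i j hij hj
    rcases Nat.eq_or_lt_of_le hij with rfl | hij
    · exact le_refl _
    · have hi : i < rest.length := lt_trans hij hj
      rw [List.getD_eq_getElem rest _ hi, List.getD_eq_getElem rest _ hj]
      exact List.pairwise_iff_getElem.mp hmono i j hi hj hij
  intro lo hi
  induction lo, hi using pvBisect.induct rest e1 with
  | case1 lo hi h mid hlt ih =>
    intro hlh hhl hbelow habove
    rw [pvBisect, if_pos h]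
    simp only [show (lo + hi) / 2 = mid from rfl, hlt, if_pos]
    have hmid : mid = (lo + hi) / 2 := rfl
    obtain ⟨h1, h2, h3⟩ := ih (by omega) hhl
      (fun k hk => lt_of_le_of_lt (hm k mid (by omega) (by omega)) hlt)
      habove
    exact ⟨h1, h2, h3⟩
  | case2 lo hi h mid hge ih =>
    intro hlh hhl hbelow habove
    rw [pvBisect, if_pos h]
    simp only [show (lo + hi) / 2 = mid from rfl, hge]
    have hmid : mid = (lo + hi) / 2 := rfl
    obtain ⟨h1, h2, h3⟩ := ih (by omega) (by omega) hbelow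
      (fun k hk hk2 => le_trans (by simpa using hge) (hm mid k hk hk2))
    exact ⟨le_trans h1 (by omega), h2, h3⟩
  | case3 lo hi h =>
    intro hlh hhl hbelow habove
    rw [pvBisect, if_neg h]
    exact ⟨by omega, hbelow, fun k hk hk2 => habove k (by omega) hk2⟩

-- a position bracketing a predicate flip turns 'take' into 'takeWhile'
theorem take_eq_takeWhile_of_char (p : String × Int × Int → Bool) :
    ∀ (l : List (String × Int × Int)) (r : Nat), r ≤ l.length →
    (∀ k, k < r → p (l.getD k ("", 0, 0)) = true) →
    (∀ k, r ≤ k → k < l.length → p (l.getD k ("", 0, 0)) = false) →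
    l.take r = l.takeWhile p := by
  intro l
  induction l with
  | nil => intro r _ _ _; simp
  | cons x xs ih =>
    intro r hr hbelow habove
    cases r with
    | zero =>
      have h0 : p x = false := by simpa using habove 0 (Nat.zero_le _) (by simp)
      simp [h0]
    | succ m =>
      have hx : p x = true := by simpa using hbelow 0 (Nat.succ_pos m)
      simp only [List.take_succ_cons, List.takeWhile_cons, hx, if_pos]
      rw [ih m (by simpa using hr)
        (fun k hk => by simpa using hbelow (k + 1) (by omega))
        (fun k hk hk2 => by simpa using habove (k + 1) (by omega) (by simpa using hk2))]

-- the slice Source B takes is exactly the prefix A scans before its break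
theorem take_pvBisect_eq_takeWhile (rest : List (String × Int × Int)) (e1 : Int)
    (hmono : rest.Pairwise (fun a b => a.2.1 ≤ b.2.1)) :
    rest.take (pvBisect rest e1 0 rest.length) = rest.takeWhile (fun x => decide (x.2.1 < e1)) := by
  obtain ⟨hle, hbelow, habove⟩ := pvBisect_char rest e1 hmono 0 rest.length (Nat.zero_le _)
    (le_refl _) (by omega) (by omega)
  exact take_eq_takeWhile_of_char _ rest _ hle
    (fun k hk => by simpa using hbelow k hk)
    (fun k hk hk2 => by simpa using habove k hk hk2)

-- A's inner scan-with-break equals one fold over the corresponding edge batch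
theorem innerA_eq_foldl (t1 : String) (s1 e1 : Int) :
    ∀ (rest : List (String × Int × Int)) (G : PySem.Dict String (List String)),
    pvInnerA t1 s1 e1 rest G =
      (((rest.takeWhile (fun x => decide (x.2.1 < e1))).filter (fun x => s1 < x.2.2)).map
        (fun x => (t1, x.1))).foldl pvAddEdge G := by
  intro rest
  induction rest with
  | nil => intro G; simp [pvInnerA]
  | cons x xs ih =>
    intro G
    obtain ⟨t2, s2, e2⟩ := x
    by_cases hb : e1 ≤ s2
    · simp [pvInnerA, hb, not_lt.mpr hb]
    · have hs2 : s2 < e1 := lt_of_not_ge hb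
      by_cases hov : s1 < e2
      · have : ¬ (e1 ≤ s2 ∨ e2 ≤ s1) := by
          intro hc; rcases hc with hc | hc <;> omega
        simp only [pvInnerA, if_neg hb, if_pos this, List.takeWhile_cons, decide_eq_true hs2,
          if_pos, List.filter_cons, decide_eq_true hov, List.map_cons, List.foldl_cons]
        rw [ih]
        rfl
      · have : ¬ ¬ (e1 ≤ s2 ∨ e2 ≤ s1) := not_not_intro (Or.inr (le_of_not_gt hov))
        simp only [pvInnerA, if_neg hb, if_neg this, List.takeWhile_cons, decide_eq_true hs2,
          if_pos, List.filter_cons, decide_eq_false (not_lt.mpr (le_of_not_gt hov))]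
        exact ih G

-- the two graph constructions agree on any start-sorted list
theorem outerA_eq_foldl_edgesB :
    ∀ (st : List (String × Int × Int)) (G : PySem.Dict String (List String)),
    st.Pairwise (fun a b => a.2.1 ≤ b.2.1) →
    pvOuterA st G = (pvEdgesB st).foldl pvAddEdge G := by
  intro st
  induction st with
  | nil => intro G _; simp [pvOuterA, pvEdgesB]
  | cons x xs ih =>
    intro G hp
    obtain ⟨t1, s1, e1⟩ := x
    have hxs : xs.Pairwise (fun a b => a.2.1 ≤ b.2.1) := (List.pairwise_cons.mp hp).2
    simp only [pvOuterA, pvEdgesB, List.foldl_append]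
    rw [take_pvBisect_eq_takeWhile xs e1 hxs, innerA_eq_foldl, ih _ hxs]

-- ===== VERDICT (by name: the statement is the Claim_ definition above) =====
theorem build_interval_graph_efficient_spec : Claim_equal_build_interval_graph_efficient := by
  intro tasks _
  unfold Spec_build_interval_graph_efficient
  unfold build_interval_graph_efficient build_interval_graph_efficient_alt
  have h := outerA_eq_foldl_edgesB (PySem.List.sorted tasks (fun x => x.2.1)) PySem.Dict.empty
    (PySem.List.sorted_pairwise tasks (fun x => x.2.1))
  simp only [h]
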